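-- pv_equiv track=rewrite | github.com/neoncircuit/CodeWars | 7 Kyu Python/80's Kids #3 Punky Brewster's Socks.py | get_socks
-- ===== SOURCE A (Python) =====
-- from typing import List
-- from collections import Counter
--
-- def get_socks(name: str, socks: List[str]) -> List[str]:
--     #your code here
--     counts = Counter(socks)
--
--     if name == "Henry":
--         for color, count in counts.items():
--             if count >= 2:
--                 return [color, color]
--         return []
--     else:
--         unique_colors = list(counts.keys())
--         return unique_colors[:2] if (len(unique_colors) >= 2) else []
-- ===== SOURCE B (Python) =====
-- def get_socks(name, socks):
--     if name == "Henry":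
--         # scan the raw list: the first sock whose color recurs later is the
--         # first color (in first-appearance order) with count >= 2
--         rest = socks
--         while rest:
--             c, rest = rest[0], rest[1:]
--             if c in rest:
--                 return [c, c]
--         return []
--     if not socks:
--         return []
--     first = socks[0]
--     for x in socks:
--         if x != first:
--             return [first, x]
--     return []
-- ===== Notes on version B (the rewrite author's own statement) =====
-- stated objective: simpler
-- what changed: Drops the Counter table entirely: the Henry branch scans the raw list and returns the first sock whose color recurs in the remaining suffix (equivalent to the first color in first-appearance order with count >= 2), and the other branch returns the head plus the first later element differing from it, with no dict/dedup structure built at all.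
import Mathlib
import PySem

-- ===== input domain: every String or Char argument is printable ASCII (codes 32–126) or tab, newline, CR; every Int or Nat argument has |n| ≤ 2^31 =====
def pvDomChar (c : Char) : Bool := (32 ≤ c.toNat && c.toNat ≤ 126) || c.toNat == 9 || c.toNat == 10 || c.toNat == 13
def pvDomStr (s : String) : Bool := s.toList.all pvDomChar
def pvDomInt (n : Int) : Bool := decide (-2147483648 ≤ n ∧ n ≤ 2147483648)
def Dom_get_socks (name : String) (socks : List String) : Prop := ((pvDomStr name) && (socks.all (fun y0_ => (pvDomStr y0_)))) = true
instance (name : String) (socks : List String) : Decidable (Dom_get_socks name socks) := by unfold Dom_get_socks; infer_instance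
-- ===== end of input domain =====

-- B drops A's Counter table: it scans the raw sock list directly (first sock whose color recurs
-- later, resp. head plus first differing element), building no dict/dedup structure at all (simpler).


-- ===== PORT A =====
-- 'for color, count in counts.items(): if count >= 2: return [color, color]'
def pvHenryItems : List (String × Int) → List String
  | [] => []
  | (color, count) :: rest => if 2 ≤ count then [color, color] else pvHenryItems rest

def get_socks (name : String) (socks : List String) : List String :=
  let counts := PySem.Dict.counter socks
  if name = "Henry" then
    pvHenryItems counts.items
  else
    let unique_colors := counts.keys
    if 2 ≤ unique_colors.length then PySem.List.slice unique_colors none (some 2) else []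

-- ===== PORT B =====
-- 'while rest: c, rest = rest[0], rest[1:]; if c in rest: return [c, c]'
def pvHenryB : List String → List String
  | [] => []
  | c :: rest => if c ∈ rest then [c, c] else pvHenryB rest

-- 'for x in socks: if x != first: return [first, x]'
def pvFirstOther (first : String) : List String → List String
  | [] => []
  | x :: rest => if x ≠ first then [first, x] else pvFirstOther first rest

def get_socks_alt (name : String) (socks : List String) : List String :=
  if name = "Henry" then
    pvHenryB socks
  else
    match socks with
    | [] => []
    | first :: _ => pvFirstOther first socks

-- ===== PRECONDITION & SPEC =====
def Spec_get_socks (name : String) (socks : List String) (out : List String) : Prop := out = get_socks_alt name socks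
instance (name : String) (socks : List String) (out : List String) : Decidable (Spec_get_socks name socks out) := by unfold Spec_get_socks; infer_instance

-- ===== CLAIM (what is proved, stated in full; the proofs are below) =====
def Claim_equal_get_socks : Prop := ∀ (name : String) (socks : List String), Dom_get_socks name socks → Spec_get_socks name socks (get_socks name socks)

-- ===== LEMMAS AND PROOFS =====

-- A's item loop only looks at the count of keys present in the list it walks.
theorem pvHenryItems_map_congr (f g : String → Int) (seen : List String)
    (h : ∀ k ∈ seen, f k = g k) :
    pvHenryItems (seen.map (fun k => (k, f k))) = pvHenryItems (seen.map (fun k => (k, g k))) := by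
  induction seen with
  | nil => rfl
  | cons c rest ih =>
      simp only [List.map, pvHenryItems]
      rw [h c (by simp)]
      split
      · rfl
      · exact ih (fun k hk => h k (by simp [hk]))

-- Henry branch: A's scan of Counter(socks).items() equals B's scan of the raw list.
theorem pvHenryItems_eq_B (socks : List String) :
    pvHenryItems ((PySem.Set.ofList socks).map (fun k => (k, (socks.count k : Int)))) = pvHenryB socks := by
  induction socks with
  | nil => rfl
  | cons c rest ih =>
      rw [PySem.Set.ofList_cons]
      simp only [List.map, pvHenryItems, pvHenryB]
      by_cases hc : c ∈ rest
      · have : (2 : Int) ≤ ((c :: rest).count c : Int) := by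
          have : 1 ≤ rest.count c := List.count_pos_iff.mpr hc
          simp [List.count_cons_self]; omega
        rw [if_pos this, if_pos hc]
      · have hcnt : ((c :: rest).count c : Int) = 1 := by
          have : rest.count c = 0 := List.count_eq_zero.mpr hc
          simp [List.count_cons_self, this]
        rw [hcnt]
        have h2 : ¬ (2 : Int) ≤ 1 := by norm_num
        simp only [if_neg h2, if_neg hc]
        have hdis : PySem.Set.discard (PySem.Set.ofList rest) c = PySem.Set.ofList rest := by
          unfold PySem.Set.discard
          apply List.filter_eq_self.mpr
          intro a ha
          have : a ∈ rest := (PySem.Set.mem_ofList _ _).mp ha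
          have : a ≠ c := fun h => hc (h ▸ this)
          simp [this]
        rw [hdis, ← ih]
        apply pvHenryItems_map_congr
        intro k hk
        have hkr : k ∈ rest := (PySem.Set.mem_ofList _ _).mp hk
        have hkc : k ≠ c := fun h => hc (h ▸ hkr)
        have : (c :: rest).count k = rest.count k := by
          rw [List.count_cons_of_ne (fun h => hkc h.symm)]
        simp [this]

-- Non-Henry branch: B's 'first differing element' scan, characterised by the deduped tail.
theorem pvFirstOther_eq (first : String) (l : List String) :
    pvFirstOther first l =
      (match PySem.Set.discard (PySem.Set.ofList l) first with
        | [] => []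
        | s :: _ => [first, s]) := by
  induction l with
  | nil => rfl
  | cons x rs ih =>
      rw [PySem.Set.ofList_cons]
      by_cases hx : x = first
      · subst hx
        have : PySem.Set.discard (x :: PySem.Set.discard (PySem.Set.ofList rs) x) x
            = PySem.Set.discard (PySem.Set.ofList rs) x := by
          unfold PySem.Set.discard
          simp [List.filter_filter]
        rw [this]
        simpa [pvFirstOther] using ih
      · have : PySem.Set.discard (x :: PySem.Set.discard (PySem.Set.ofList rs) x) first
            = x :: PySem.Set.discard (PySem.Set.discard (PySem.Set.ofList rs) x) first := by
          unfold PySem.Set.discard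
          simp [hx]
        rw [this]
        simp [pvFirstOther, hx]

-- ===== VERDICT (by name: the statement is the Claim_ definition above) =====
theorem get_socks_spec : Claim_equal_get_socks := by
  intro name socks _
  unfold Spec_get_socks get_socks get_socks_alt
  simp only [PySem.Dict.items_counter, PySem.Dict.keys_counter]
  split
  · exact pvHenryItems_eq_B socks
  · cases socks with
    | nil => rfl
    | cons first rest =>
        change _ = pvFirstOther first (first :: rest)
        rw [pvFirstOther_eq]
        have hT : PySem.Set.discard (PySem.Set.ofList (first :: rest)) first
            = PySem.Set.discard (PySem.Set.ofList rest) first := by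
          rw [PySem.Set.ofList_cons]
          unfold PySem.Set.discard
          simp [List.filter_filter]
        rw [hT]
        cases hd : PySem.Set.discard (PySem.Set.ofList rest) first with
        | nil => simp [PySem.Set.ofList_cons, hd]
        | cons s t =>
            rw [PySem.Set.ofList_cons, hd]
            have hlen : 2 ≤ (first :: s :: t).length := by simp
            rw [if_pos hlen, PySem.List.slice_to]
            · rfl
            · norm_num
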